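-- pv_equiv track=rewrite | github.com/Ranjithkumar3005/python_programs | leetcode/finding_winng_coin.py | losingPlayer
-- ===== SOURCE A (Python) =====
-- def losingPlayer(x, y):
--     """
--     :type x: int
--     :type y: int
--     :rtype: str
--     """
--     c=0
--     while True:
--         if x>0 and y>=4:
--             x-=1
--             y-=4
--             c+=1
--
--         else:
--             break
--     if c%2==0:
--         return "Bob"
--     else:
--         return "Alice"
-- ===== SOURCE B (Python) =====
-- def losingPlayer(x, y):
--     c = max(0, min(x, y // 4))
--     return "Alice" if c % 2 else "Bob"
-- ===== Notes on version B (the rewrite author's own statement) =====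
-- stated objective: faster
-- what changed: Replaces the simulation loop with the closed form count = max(0, min(x, y//4)) and a parity check.
import Mathlib
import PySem

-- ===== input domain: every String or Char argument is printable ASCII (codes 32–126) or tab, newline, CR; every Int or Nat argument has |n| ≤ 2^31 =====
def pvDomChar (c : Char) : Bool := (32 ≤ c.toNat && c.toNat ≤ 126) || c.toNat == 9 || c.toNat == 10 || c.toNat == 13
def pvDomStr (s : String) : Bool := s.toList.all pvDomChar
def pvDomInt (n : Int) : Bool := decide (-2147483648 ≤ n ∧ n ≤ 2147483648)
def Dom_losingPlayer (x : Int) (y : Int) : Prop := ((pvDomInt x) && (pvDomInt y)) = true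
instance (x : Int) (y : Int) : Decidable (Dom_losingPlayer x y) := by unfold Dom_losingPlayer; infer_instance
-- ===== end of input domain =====

-- B replaces A's step-by-step simulation loop with the closed form max(0, min(x, y//4)) and a parity check (measured faster).
-- ===== PORT A =====
-- loop: while x>0 and y>=4: x-=1; y-=4; c+=1
def losingPlayerLoop (x : Int) (y : Int) (c : Int) : Int :=
  if x > 0 ∧ y ≥ 4 then losingPlayerLoop (x - 1) (y - 4) (c + 1) else c
termination_by x.toNat
decreasing_by omega

def losingPlayer (x : Int) (y : Int) : String :=
  let c := losingPlayerLoop x y 0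
  if PySem.Int.mod c 2 == 0 then "Bob" else "Alice"

-- ===== PORT B =====
-- B: closed form, O(1)
def losingPlayer_alt (x : Int) (y : Int) : String :=
  let c := max 0 (min x (PySem.Int.floordiv y 4))
  if PySem.Int.mod c 2 != 0 then "Alice" else "Bob"

-- ===== PRECONDITION & SPEC =====
def Spec_losingPlayer (x : Int) (y : Int) (out : String) : Prop := out = losingPlayer_alt x y
instance (x : Int) (y : Int) (out : String) : Decidable (Spec_losingPlayer x y out) := by unfold Spec_losingPlayer; infer_instance

-- ===== CLAIM (what is proved, stated in full; the proofs are below) =====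
def Claim_equal_losingPlayer : Prop := ∀ (x : Int) (y : Int), Dom_losingPlayer x y → Spec_losingPlayer x y (losingPlayer x y)

-- ===== LEMMAS AND PROOFS =====

-- ===== VERDICT (by name: the statement is the Claim_ definition above) =====
theorem losingPlayerLoop_eq (x y c : Int) :
    losingPlayerLoop x y c = c + max 0 (min x (PySem.Int.floordiv y 4)) := by
  by_cases h : x > 0 ∧ y ≥ 4
  · rw [losingPlayerLoop, if_pos h, losingPlayerLoop_eq (x-1) (y-4) (c+1)]
    have h4 : PySem.Int.floordiv (y-4) 4 = PySem.Int.floordiv y 4 - 1 := by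
      rw [PySem.Int.floordiv_eq_ediv_of_pos (by omega), PySem.Int.floordiv_eq_ediv_of_pos (by omega)]
      omega
    have hy : PySem.Int.floordiv y 4 ≥ 1 := by
      rw [PySem.Int.floordiv_eq_ediv_of_pos (by omega)]; omega
    rw [h4]; omega
  · rw [losingPlayerLoop, if_neg h]
    have hd : y < 4 → PySem.Int.floordiv y 4 ≤ 0 := by
      intro hy
      rw [PySem.Int.floordiv_eq_ediv_of_pos (by omega)]; omega
    rcases not_and_or.mp h with hx | hy
    · omega
    · have := hd (by omega); omega
termination_by x.toNat
decreasing_by omega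

theorem losingPlayer_spec : Claim_equal_losingPlayer := by
  intro x y _
  unfold Spec_losingPlayer losingPlayer losingPlayer_alt
  rw [losingPlayerLoop_eq]
  simp only [zero_add]
  set c := max 0 (min x (PySem.Int.floordiv y 4)) with hc
  have h2 : PySem.Int.mod c 2 = c % 2 := PySem.Int.mod_eq_emod_of_pos (by omega)
  rcases Int.emod_two_eq_zero_or_one c with h | h <;> simp [h2, h, Int.emod_emod_of_dvd]
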